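-- pv_equiv track=rewrite | github.com/shaneb74/cca_senior_navigator_v3 | products/gcp/derive.py | _choose_blurb
-- ===== SOURCE A (Python) =====
-- from typing import Any, Dict, List
--
-- def _choose_blurb(mapping: Dict[int, str], score: int) -> str:
--     if not mapping:
--         return ""
--     if score in mapping:
--         return mapping[score]
--     candidates = [mapping[s] for s in sorted(mapping.keys()) if s <= score]
--     if candidates:
--         return candidates[-1]
--     return mapping.get(min(mapping.keys()), "")
-- ===== SOURCE B (Python) =====
-- def _choose_blurb(mapping, score):
--     best = None  # (key, value) with the largest key <= score seen so far
--     mn = None    # (key, value) with the overall smallest key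
--     for k, v in mapping.items():
--         if k <= score and (best is None or best[0] < k):
--             best = (k, v)
--         if mn is None or k < mn[0]:
--             mn = (k, v)
--     if best is not None:
--         return best[1]
--     if mn is not None:
--         return mn[1]
--     return ""
-- ===== Notes on version B (the rewrite author's own statement) =====
-- stated objective: alternative
-- what changed: Replaces the membership shortcut plus sort-filter-materialize-list approach with a single linear scan that tracks the largest key <= score and the overall smallest key.
import Mathlib
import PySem

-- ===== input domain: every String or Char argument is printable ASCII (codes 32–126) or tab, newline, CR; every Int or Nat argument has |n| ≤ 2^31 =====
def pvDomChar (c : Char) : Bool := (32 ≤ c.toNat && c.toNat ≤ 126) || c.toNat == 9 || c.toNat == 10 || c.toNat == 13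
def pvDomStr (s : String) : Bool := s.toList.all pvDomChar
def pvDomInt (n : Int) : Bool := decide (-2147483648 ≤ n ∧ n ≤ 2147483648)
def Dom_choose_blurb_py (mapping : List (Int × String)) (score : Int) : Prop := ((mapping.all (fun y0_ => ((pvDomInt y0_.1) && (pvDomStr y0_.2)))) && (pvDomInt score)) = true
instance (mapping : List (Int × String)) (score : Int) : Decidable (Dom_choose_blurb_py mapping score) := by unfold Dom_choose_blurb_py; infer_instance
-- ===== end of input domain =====

-- B replaces A's membership-shortcut plus sort/filter/materialize pass by a single linear scan
-- tracking the largest key ≤ score and the overall smallest key (alternative algorithm, same result).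

-- ===== PORT A =====
-- dict lookup on the association list: first match (the list carries a Python dict, keys in insertion order)
def pvLookup (m : List (Int × String)) (k : Int) : Option String :=
  match m with
  | [] => none
  | (a, v) :: t => if a = k then some v else pvLookup t k

def choose_blurb_py (mapping : List (Int × String)) (score : Int) : String :=
  if mapping.isEmpty then ""                                        -- if not mapping: return ""
  else
    match pvLookup mapping score with                               -- if score in mapping: return mapping[score]
    | some v => v
    | none =>
      let keys := PySem.List.dedup (mapping.map Prod.fst)           -- mapping.keys()
      let candidates := ((PySem.List.sorted keys (fun x => x) false).filter
          (fun s => decide (s ≤ score))).map (fun s => (pvLookup mapping s).getD "")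
      if candidates.isEmpty then
        match PySem.List.min? keys (fun x => x) with                -- mapping.get(min(mapping.keys()), "")
        | some m => (pvLookup mapping m).getD ""
        | none => ""                                                -- unreachable: mapping is nonempty here
      else (PySem.List.pyGet? candidates (-1)).getD ""              -- candidates[-1]

-- ===== PORT B =====
-- one fold step: update (best = largest key ≤ score so far, mn = smallest key so far)
def pvStep (score : Int) (acc : Option (Int × String) × Option (Int × String)) (kv : Int × String) :
    Option (Int × String) × Option (Int × String) :=
  let best := match acc.1 with
    | none => if kv.1 ≤ score then some kv else none
    | some b => if kv.1 ≤ score ∧ b.1 < kv.1 then some kv else some b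
  let mn := match acc.2 with
    | none => some kv
    | some m => if kv.1 < m.1 then some kv else some m
  (best, mn)

def choose_blurb_py_alt (mapping : List (Int × String)) (score : Int) : String :=
  match mapping.foldl (pvStep score) (none, none) with
  | (some b, _) => b.2
  | (none, some m) => m.2
  | (none, none) => ""

-- ===== PRECONDITION & SPEC =====
def Spec_choose_blurb_py (mapping : List (Int × String)) (score : Int) (out : String) : Prop := out = choose_blurb_py_alt mapping score
instance (mapping : List (Int × String)) (score : Int) (out : String) : Decidable (Spec_choose_blurb_py mapping score out) := by unfold Spec_choose_blurb_py; infer_instance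

-- ===== CLAIM (what is proved, stated in full; the proofs are below) =====
def Claim_equal_choose_blurb_py : Prop := ∀ (mapping : List (Int × String)) (score : Int), Dom_choose_blurb_py mapping score → Spec_choose_blurb_py mapping score (choose_blurb_py mapping score)

-- ===== LEMMAS AND PROOFS =====

-- invariant for the best-so-far component of B's fold over a processed prefix p
def InvBest (score : Int) (p : List (Int × String)) (r : Option (Int × String)) : Prop :=
  match r with
  | none => ∀ kv ∈ p, ¬ kv.1 ≤ score
  | some b => b.1 ≤ score ∧ pvLookup p b.1 = some b.2 ∧ ∀ kv ∈ p, kv.1 ≤ score → kv.1 ≤ b.1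

-- invariant for the min-so-far component
def InvMin (p : List (Int × String)) (r : Option (Int × String)) : Prop :=
  match r with
  | none => p = []
  | some m => pvLookup p m.1 = some m.2 ∧ ∀ kv ∈ p, m.1 ≤ kv.1

theorem pvLookup_append (p q : List (Int × String)) (k : Int) :
    pvLookup (p ++ q) k = (pvLookup p k).or (pvLookup q k) := by
  induction p with
  | nil => simp [pvLookup]
  | cons hd t ih =>
    obtain ⟨a, v⟩ := hd
    by_cases h : a = k <;> simp [pvLookup, h, ih]

theorem pvLookup_eq_none_of_forall (p : List (Int × String)) (k : Int)
    (h : ∀ kv ∈ p, kv.1 ≠ k) : pvLookup p k = none := by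
  induction p with
  | nil => rfl
  | cons hd t ih =>
    have h1 : hd.1 ≠ k := h hd (by simp)
    obtain ⟨a, v⟩ := hd
    simp [pvLookup, h1]
    exact ih (fun kv hkv => h kv (by simp [hkv]))

theorem pvLookup_mem {p : List (Int × String)} {k : Int} {v : String}
    (h : pvLookup p k = some v) : (k, v) ∈ p := by
  induction p with
  | nil => simp [pvLookup] at h
  | cons hd t ih =>
    obtain ⟨a, w⟩ := hd
    by_cases ha : a = k
    · simp [pvLookup, ha] at h
      subst ha; subst h; simp
    · simp [pvLookup, ha] at h
      exact List.mem_cons_of_mem _ (ih h)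

theorem step_inv (score : Int) (p : List (Int × String))
    (acc : Option (Int × String) × Option (Int × String)) (kv : Int × String)
    (h1 : InvBest score p acc.1) (h2 : InvMin p acc.2) :
    InvBest score (p ++ [kv]) (pvStep score acc kv).1 ∧
    InvMin (p ++ [kv]) (pvStep score acc kv).2 := by
  obtain ⟨r1, r2⟩ := acc
  obtain ⟨k0, v0⟩ := kv
  constructor
  · -- best component
    cases r1 with
    | none =>
      by_cases hle : k0 ≤ score
      · have hE : (pvStep score (none, r2) (k0, v0)).1 = some (k0, v0) := by
          simp [pvStep, hle]
        rw [hE]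
        refine ⟨hle, ?_, ?_⟩
        · rw [pvLookup_append, pvLookup_eq_none_of_forall p k0
            (fun x hx hkx => h1 x hx (by rw [hkx]; exact hle))]
          simp [pvLookup]
        · intro x hx hxle
          rcases List.mem_append.mp hx with hx | hx
          · exact absurd hxle (h1 x hx)
          · simp at hx; simp [hx]
      · have hE : (pvStep score (none, r2) (k0, v0)).1 = none := by
          simp [pvStep, hle]
        rw [hE]
        intro x hx
        rcases List.mem_append.mp hx with hx | hx
        · exact h1 x hx
        · simp at hx; simpa [hx] using hle
    | some b =>
      obtain ⟨hb1, hb2, hb3⟩ := h1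
      by_cases hc : k0 ≤ score ∧ b.1 < k0
      · have hE : (pvStep score (some b, r2) (k0, v0)).1 = some (k0, v0) := by
          simp [pvStep, hc]
        rw [hE]
        refine ⟨hc.1, ?_, ?_⟩
        · rw [pvLookup_append, pvLookup_eq_none_of_forall p k0
            (fun x hx hkx => by
              have h' := hb3 x hx (by rw [hkx]; exact hc.1)
              have h'' := hc.2
              omega)]
          simp [pvLookup]
        · intro x hx hxle
          rcases List.mem_append.mp hx with hx | hx
          · have h' := hb3 x hx hxle
            have h'' := hc.2
            omega
          · simp at hx; simp [hx]
      · have hE : (pvStep score (some b, r2) (k0, v0)).1 = some b := by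
          simp only [pvStep, if_neg hc]
        rw [hE]
        refine ⟨hb1, ?_, ?_⟩
        · rw [pvLookup_append, hb2]; rfl
        · intro x hx hxle
          rcases List.mem_append.mp hx with hx | hx
          · exact hb3 x hx hxle
          · simp at hx
            have hxle' : k0 ≤ score := by rw [hx] at hxle; exact hxle
            have hnb : ¬ b.1 < k0 := fun hlt => hc ⟨hxle', hlt⟩
            simp [hx]; omega
  · -- min component
    cases r2 with
    | none =>
      have hp : p = [] := h2
      subst hp
      have hE : (pvStep score (r1, none) (k0, v0)).2 = some (k0, v0) := by
        simp [pvStep]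
      rw [hE]
      refine ⟨by simp [pvLookup], ?_⟩
      intro x hx; simp at hx; simp [hx]
    | some m =>
      obtain ⟨hm1, hm2⟩ := h2
      by_cases hc : k0 < m.1
      · have hE : (pvStep score (r1, some m) (k0, v0)).2 = some (k0, v0) := by
          simp [pvStep, hc]
        rw [hE]
        refine ⟨?_, ?_⟩
        · rw [pvLookup_append, pvLookup_eq_none_of_forall p k0
            (fun x hx hkx => by have := hm2 x hx; omega)]
          simp [pvLookup]
        · intro x hx
          rcases List.mem_append.mp hx with hx | hx
          · have := hm2 x hx; omega
          · simp at hx; simp [hx]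
      · have hE : (pvStep score (r1, some m) (k0, v0)).2 = some m := by
          simp [pvStep, hc]
        rw [hE]
        refine ⟨by rw [pvLookup_append, hm1]; rfl, ?_⟩
        intro x hx
        rcases List.mem_append.mp hx with hx | hx
        · exact hm2 x hx
        · simp at hx; simp [hx]; omega

theorem fold_inv (score : Int) (l : List (Int × String)) :
    ∀ (p : List (Int × String)) (acc : Option (Int × String) × Option (Int × String)),
      InvBest score p acc.1 → InvMin p acc.2 →
      InvBest score (p ++ l) ((l.foldl (pvStep score) acc).1) ∧
      InvMin (p ++ l) ((l.foldl (pvStep score) acc).2) := by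
  induction l with
  | nil => intro p acc h1 h2; simpa using ⟨h1, h2⟩
  | cons x t ih =>
    intro p acc h1 h2
    have hstep := step_inv score p acc x h1 h2
    have := ih (p ++ [x]) (pvStep score acc x) hstep.1 hstep.2
    simpa [List.foldl_cons, List.append_assoc] using this

theorem fold_inv_main (score : Int) (mapping : List (Int × String)) :
    InvBest score mapping ((mapping.foldl (pvStep score) (none, none)).1) ∧
    InvMin mapping ((mapping.foldl (pvStep score) (none, none)).2) := by
  have h := fold_inv score mapping [] (none, none)
    (by intro x hx; simp at hx) (by rfl)
  simpa using h

-- last element of a ≤-sorted Int list bounds every element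
theorem le_getLast_of_pairwise (l : List Int) (hp : l.Pairwise (· ≤ ·)) :
    ∀ x ∈ l, ∀ h : l ≠ [], x ≤ l.getLast h := by
  induction l with
  | nil => intro x hx; simp at hx
  | cons y t ih =>
    intro x hx h
    rcases List.pairwise_cons.mp hp with ⟨hy, hp'⟩
    cases t with
    | nil => simp at hx; simp [hx]
    | cons z t' =>
      rw [List.getLast_cons (by simp)]
      rcases List.mem_cons.mp hx with hx | hx
      · subst hx
        exact le_trans (hy z (by simp)) (ih hp' z (by simp) (by simp))
      · exact ih hp' x hx (by simp)

-- key of an element of the list, as a member of the list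
theorem exists_of_mem_map_fst {mapping : List (Int × String)} {k : Int}
    (h : k ∈ mapping.map Prod.fst) : ∃ kv ∈ mapping, kv.1 = k := by
  obtain ⟨kv, hkv, hk⟩ := List.mem_map.mp h
  exact ⟨kv, hkv, hk⟩

-- A returns the value of the largest key ≤ score when one exists
theorem A_best (mapping : List (Int × String)) (score : Int) (b : Int × String)
    (hne : mapping ≠ []) (hb : InvBest score mapping (some b)) :
    choose_blurb_py mapping score = b.2 := by
  obtain ⟨hb1, hb2, hb3⟩ := hb
  have hbmem : (b.1, b.2) ∈ mapping := pvLookup_mem hb2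
  unfold choose_blurb_py
  rw [if_neg (by simpa [List.isEmpty_iff] using hne)]
  cases hsc : pvLookup mapping score with
  | some v =>
    have hmem : (score, v) ∈ mapping := pvLookup_mem hsc
    have h1 : score ≤ b.1 := hb3 (score, v) hmem le_rfl
    have h2 : b.1 = score := le_antisymm hb1 h1
    rw [← h2, hb2] at hsc
    simpa using hsc.symm
  | none =>
    simp only
    set keys := PySem.List.dedup (mapping.map Prod.fst) with hkeys
    set fs := (PySem.List.sorted keys (fun x => x) false).filter (fun s => decide (s ≤ score)) with hfsdef
    have hbkeys : b.1 ∈ keys := by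
      rw [hkeys, PySem.List.mem_dedup]
      exact List.mem_map.mpr ⟨(b.1, b.2), hbmem, rfl⟩
    have hbfs : b.1 ∈ fs := by
      rw [hfsdef]
      exact List.mem_filter.mpr ⟨by rw [PySem.List.mem_sorted]; exact hbkeys, by simpa using hb1⟩
    have hfsne : fs ≠ [] := List.ne_nil_of_mem hbfs
    have hcne : ((fs.map (fun s => (pvLookup mapping s).getD "")).isEmpty) ≠ true := by
      simp [List.isEmpty_iff, hfsne]
    rw [if_neg hcne]
    have hsorted : (PySem.List.sorted keys (fun x => x) false).Pairwise (· ≤ ·) := by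
      simpa using PySem.List.sorted_pairwise keys (fun x => x)
    have hpair : fs.Pairwise (· ≤ ·) := by
      rw [hfsdef]
      exact List.Pairwise.sublist List.filter_sublist hsorted
    have hlastmem : fs.getLast hfsne ∈ fs := List.getLast_mem hfsne
    have hlast_le : fs.getLast hfsne ≤ b.1 := by
      have hmf := List.mem_filter.mp (by rw [← hfsdef]; exact hlastmem)
      have h1 : fs.getLast hfsne ∈ keys := by have := hmf.1; rwa [PySem.List.mem_sorted] at this
      have h2 : fs.getLast hfsne ≤ score := by simpa using hmf.2
      rw [hkeys, PySem.List.mem_dedup] at h1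
      obtain ⟨kv, hkv, hk⟩ := exists_of_mem_map_fst h1
      have := hb3 kv hkv (by rw [hk]; exact h2)
      omega
    have hle_last : b.1 ≤ fs.getLast hfsne := le_getLast_of_pairwise fs hpair b.1 hbfs hfsne
    have hlast : fs.getLast hfsne = b.1 := le_antisymm hlast_le hle_last
    rw [PySem.List.pyGet?_neg_one, List.getLast?_map,
      List.getLast?_eq_some_getLast hfsne]
    simp [hlast, hb2]

-- A returns the value of the smallest key when no key is ≤ score
theorem A_min (mapping : List (Int × String)) (score : Int) (m : Int × String)
    (hne : mapping ≠ []) (hnone : InvBest score mapping none) (hm : InvMin mapping (some m)) :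
    choose_blurb_py mapping score = m.2 := by
  obtain ⟨hm1, hm2⟩ := hm
  have hmmem : (m.1, m.2) ∈ mapping := pvLookup_mem hm1
  unfold choose_blurb_py
  rw [if_neg (by simpa [List.isEmpty_iff] using hne)]
  cases hsc : pvLookup mapping score with
  | some v =>
    exact absurd le_rfl (hnone (score, v) (pvLookup_mem hsc))
  | none =>
    simp only
    set keys := PySem.List.dedup (mapping.map Prod.fst) with hkeys
    have hfs : (PySem.List.sorted keys (fun x => x) false).filter (fun s => decide (s ≤ score)) = [] := by
      rw [List.filter_eq_nil_iff]
      intro x hx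
      have hxk : x ∈ keys := by rwa [PySem.List.mem_sorted] at hx
      rw [hkeys, PySem.List.mem_dedup] at hxk
      obtain ⟨kv, hkv, hk⟩ := exists_of_mem_map_fst hxk
      have := hnone kv hkv
      simp; omega
    rw [hfs]
    simp only [List.map_nil, List.isEmpty_nil, if_pos]
    have hmkeys : m.1 ∈ keys := by
      rw [hkeys, PySem.List.mem_dedup]
      exact List.mem_map.mpr ⟨(m.1, m.2), hmmem, rfl⟩
    cases hmin : PySem.List.min? keys (fun x => x) with
    | none =>
      rw [PySem.List.min?_eq_none_iff] at hmin
      rw [hmin] at hmkeys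
      simp at hmkeys
    | some m0 =>
      have h1 : m0 ∈ keys := PySem.List.min?_mem hmin
      have h2 : m0 ≤ m.1 := PySem.List.min?_isMin hmin m.1 hmkeys
      rw [hkeys, PySem.List.mem_dedup] at h1
      obtain ⟨kv, hkv, hk⟩ := exists_of_mem_map_fst h1
      have h3 : m.1 ≤ m0 := by have := hm2 kv hkv; omega
      have h4 : m0 = m.1 := le_antisymm h2 h3
      simp [h4, hm1]

-- ===== VERDICT (by name: the statement is the Claim_ definition above) =====
theorem choose_blurb_py_spec : Claim_equal_choose_blurb_py := by
  intro mapping score _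
  unfold Spec_choose_blurb_py
  by_cases hne : mapping = []
  · subst hne; rfl
  · obtain ⟨hbest, hmin⟩ := fold_inv_main score mapping
    cases hfold : mapping.foldl (pvStep score) (none, none) with
    | mk r1 r2 =>
      rw [hfold] at hbest hmin
      cases r1 with
      | some b =>
        rw [A_best mapping score b hne hbest]
        simp [choose_blurb_py_alt, hfold]
      | none =>
        cases r2 with
        | none => exact absurd hmin hne
        | some m =>
          rw [A_min mapping score m hne hbest hmin]
          simp [choose_blurb_py_alt, hfold]
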